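-- pv_equiv track=rewrite | github.com/anaconda/anaconda-linter | anaconda_linter/lint/check_build_help.py | _is_exception
-- ===== SOURCE A (Python) =====
-- from typing import Any, Final
--
-- PYTHON_BUILD_TOOLS: Final[tuple] = (
--     "cython",
--     "flit",
--     "flit-core",
--     "hatch",
--     "hatchling",
--     "meson",
--     "meson-python",
--     "pdm",
--     "pdm-pep517",
--     "pip",
--     "poetry",
--     "poetry-core",
--     "pybind11",
--     "setuptools",
--     "setuptools-rust",
--     "setuptools_scm",
--     "whey",
--     "scikit-build-core",
--     "scikit-build",
--     "maturin",
--     "python-build",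
--     "build",
-- )
--
-- def _is_exception(package: str) -> bool:
--     """
--     Determines if a package is an exception to this pinning linter check.
--     :param package: Package name to check
--     :returns: True if the package is an exception. False otherwise.
--     """
--     exceptions = (
--         "python",
--         "toml",
--         "wheel",
--         "packaging",
--         *PYTHON_BUILD_TOOLS,
--     )
--     # It doesn't make sense to pin the versions of hatch plugins if we're not pinning
--     # hatch. We could explicitly enumerate the 15 odd plugins in PYTHON_BUILD_TOOLS, but
--     # this seemed lower maintenance
--     return (package in exceptions) or any(package.startswith(f"{pkg}-") for pkg in PYTHON_BUILD_TOOLS)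
-- ===== SOURCE B (Python) =====
-- from typing import Final
--
-- PYTHON_BUILD_TOOLS: Final[tuple] = (
--     "cython",
--     "flit",
--     "flit-core",
--     "hatch",
--     "hatchling",
--     "meson",
--     "meson-python",
--     "pdm",
--     "pdm-pep517",
--     "pip",
--     "poetry",
--     "poetry-core",
--     "pybind11",
--     "setuptools",
--     "setuptools-rust",
--     "setuptools_scm",
--     "whey",
--     "scikit-build-core",
--     "scikit-build",
--     "maturin",
--     "python-build",
--     "build",
-- )
--
-- _TOOLS: Final[frozenset] = frozenset(PYTHON_BUILD_TOOLS)
-- _EXCEPTIONS: Final[frozenset] = _TOOLS.union(("python", "toml", "wheel", "packaging"))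
--
--
-- def _is_exception(package: str) -> bool:
--     if package in _EXCEPTIONS:
--         return True
--     # a tool prefix followed by "-" means the prefix ends right before some hyphen:
--     # scan the hyphen positions of `package` and look the prefix up in the tool set.
--     return any(package[:i] in _TOOLS for i, ch in enumerate(package) if ch == "-")
-- ===== Notes on version B (the rewrite author's own statement) =====
-- stated objective: alternative
-- what changed: Instead of testing whether the package starts with each of the 22 build tools followed by a hyphen, B scans the hyphen positions of the input and looks each hyphen-delimited prefix up in a precomputed frozenset of tools; the exceptions membership test also uses a precomputed frozenset.
import Mathlib
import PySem

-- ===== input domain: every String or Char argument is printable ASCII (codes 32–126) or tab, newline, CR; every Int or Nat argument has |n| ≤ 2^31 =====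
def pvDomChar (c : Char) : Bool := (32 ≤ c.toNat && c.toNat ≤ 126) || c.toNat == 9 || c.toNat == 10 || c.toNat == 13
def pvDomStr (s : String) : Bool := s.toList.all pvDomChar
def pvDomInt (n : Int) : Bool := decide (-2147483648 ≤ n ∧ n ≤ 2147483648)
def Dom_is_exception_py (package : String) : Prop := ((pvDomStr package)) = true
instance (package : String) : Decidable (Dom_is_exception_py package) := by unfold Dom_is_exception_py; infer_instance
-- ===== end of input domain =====

-- B replaces A's per-tool startswith scan by a scan over the input's hyphen positions
-- with set lookups of the hyphen-delimited prefixes (objective: alternative decomposition).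

-- module-level constant shared by both implementations
def pyBuildTools : List String :=
  ["cython", "flit", "flit-core", "hatch", "hatchling", "meson", "meson-python",
   "pdm", "pdm-pep517", "pip", "poetry", "poetry-core", "pybind11", "setuptools",
   "setuptools-rust", "setuptools_scm", "whey", "scikit-build-core", "scikit-build",
   "maturin", "python-build", "build"]

-- ===== PORT A =====
def is_exception_py (package : String) : Bool :=
  let exceptions : List String := ["python", "toml", "wheel", "packaging"] ++ pyBuildTools
  exceptions.contains package
    || pyBuildTools.any (fun pkg => PySem.Str.startswith package (pkg ++ "-"))

-- ===== PORT B =====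
def pvToolsSet : PySem.Set String := PySem.Set.ofList pyBuildTools
def pvExceptionsSet : PySem.Set String :=
  PySem.Set.union pvToolsSet ["python", "toml", "wheel", "packaging"]

def is_exception_py_alt (package : String) : Bool :=
  if PySem.Set.contains pvExceptionsSet package then true
  else
    (PySem.List.enumerate package.toList).any
      (fun p => p.2 == '-' && PySem.Set.contains pvToolsSet (PySem.Str.slice package none (some p.1)))

-- ===== PRECONDITION & SPEC =====
def Spec_is_exception_py (package : String) (out : Bool) : Prop := out = is_exception_py_alt package
instance (package : String) (out : Bool) : Decidable (Spec_is_exception_py package out) := by unfold Spec_is_exception_py; infer_instance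

-- ===== CLAIM (what is proved, stated in full; the proofs are below) =====
def Claim_equal_is_exception_py : Prop := ∀ (package : String), Dom_is_exception_py package → Spec_is_exception_py package (is_exception_py package)

-- ===== LEMMAS AND PROOFS =====

-- a list followed by one element is a prefix of s iff s has that element at some
-- position k whose prefix s.take k is the list
theorem prefix_elem_iff (p : List Char) (d : Char) (s : List Char) :
    (p ++ [d]).isPrefixOf s = true ↔
      ∃ (k : Nat) (_ : k < s.length), s[k] = d ∧ s.take k = p := by
  rw [List.isPrefixOf_iff_prefix]
  constructor
  · rintro ⟨rest, hr⟩
    refine ⟨p.length, ?_, ?_, ?_⟩ <;> subst hr <;> simp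
  · rintro ⟨k, hk, hd, ht⟩
    refine ⟨s.drop (k + 1), ?_⟩
    have hs : s = s.take k ++ s[k] :: s.drop (k + 1) := by
      conv_lhs => rw [← List.take_append_drop k s, List.drop_eq_getElem_cons hk]
    rw [ht, hd] at hs
    simpa using hs.symm

theorem contains_mem {l : List String} {x : String} :
    l.contains x = true ↔ x ∈ l := by
  simp

theorem membership_eq (package : String) :
    ((["python", "toml", "wheel", "packaging"] ++ pyBuildTools).contains package)
      = PySem.Set.contains pvExceptionsSet package := by
  have : package ∈ (["python", "toml", "wheel", "packaging"] ++ pyBuildTools) ↔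
      package ∈ (pvExceptionsSet : List String) := by
    have hset : (pvExceptionsSet : List String)
        = pyBuildTools ++ ["python", "toml", "wheel", "packaging"] := by decide
    rw [hset]
    simp only [List.mem_append]
    tauto
  simp only [PySem.Set.contains]
  rw [Bool.eq_iff_iff, contains_mem, contains_mem]
  exact this

theorem any_eq (package : String) :
    (pyBuildTools.any (fun pkg => PySem.Str.startswith package (pkg ++ "-")))
      = (PySem.List.enumerate package.toList).any
          (fun p => p.2 == '-' && PySem.Set.contains pvToolsSet (PySem.Str.slice package none (some p.1))) := by
  rw [Bool.eq_iff_iff]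
  simp only [List.any_eq_true, PySem.Str.startswith, PySem.Chars.startswith,
    PySem.List.mem_enumerate_iff]
  constructor
  · rintro ⟨t, ht, hp⟩
    have : (t.toList ++ ['-']).isPrefixOf package.toList = true := by
      simpa using hp
    obtain ⟨k, hk, hd, htake⟩ := (prefix_elem_iff _ _ _).mp this
    refine ⟨((0 : Int) + k, package.toList[k]), ⟨k, hk, rfl⟩, ?_⟩
    simp only [hd, beq_self_eq_true, Bool.true_and]
    rw [PySem.Set.contains, contains_mem]
    have hslice : PySem.Str.slice package none (some ((0 : Int) + k)) = t := by
      apply String.ext  -- equality of strings via their char lists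
      rw [PySem.Str.toList_slice]
      simpa [PySem.Chars.slice_eq_listSlice, PySem.List.slice_to_natCast] using htake
    rw [hslice]
    rw [show pvToolsSet = PySem.Set.ofList pyBuildTools from rfl, PySem.Set.mem_ofList]
    exact ht
  · rintro ⟨pr, ⟨k, hk, rfl⟩, hp⟩
    simp only [Bool.and_eq_true, beq_iff_eq] at hp
    obtain ⟨hd, hmem⟩ := hp
    rw [PySem.Set.contains, contains_mem,
      show pvToolsSet = PySem.Set.ofList pyBuildTools from rfl, PySem.Set.mem_ofList] at hmem
    refine ⟨_, hmem, ?_⟩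
    simp only [String.toList_append, show ("-" : String).toList = ['-'] from rfl]
    have hslice : (PySem.Str.slice package none (some ((0 : Int) + k))).toList
        = package.toList.take k := by
      rw [PySem.Str.toList_slice]
      simp [PySem.Chars.slice_eq_listSlice, PySem.List.slice_to_natCast]
    rw [prefix_elem_iff]
    exact ⟨k, hk, hd, by rw [← hslice]⟩

-- ===== VERDICT (by name: the statement is the Claim_ definition above) =====
theorem is_exception_py_spec : Claim_equal_is_exception_py := by
  intro package _
  unfold Spec_is_exception_py is_exception_py is_exception_py_alt
  dsimp only
  rw [membership_eq, any_eq]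
  cases h : PySem.Set.contains pvExceptionsSet package <;> simp
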